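-- pv_equiv track=rewrite | github.com/DaveBerkeley/lasercut | kerf.py | line_pairs
-- ===== SOURCE A (Python) =====
-- def line_pairs(points):
--     first = None
--     while len(points) >= 3:
--         l0 = points[:2]
--         l1 = points[1:3]
--         yield l0, l1
--         points = points[1:]
--         if first is None:
--             first = l0
--     # and the first shall be last
--     yield points, first
-- ===== SOURCE B (Python) =====
-- def line_pairs(points):
--     if len(points) < 3:
--         yield points, None
--         return
--     segs = [points[i:i + 2] for i in range(len(points) - 1)]
--     n = len(segs)
--     for i in range(n):
--         yield segs[i], segs[(i + 1) % n]
-- ===== Notes on version B (the rewrite author's own statement) =====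
-- stated objective: faster
-- what changed: Replaces A's shrinking-slice while-loop with a deferred 'first' sentinel by precomputing the list of two-point segments once and pairing segs[i] with segs[(i+1) % n] via modular indexing.
import Mathlib
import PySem

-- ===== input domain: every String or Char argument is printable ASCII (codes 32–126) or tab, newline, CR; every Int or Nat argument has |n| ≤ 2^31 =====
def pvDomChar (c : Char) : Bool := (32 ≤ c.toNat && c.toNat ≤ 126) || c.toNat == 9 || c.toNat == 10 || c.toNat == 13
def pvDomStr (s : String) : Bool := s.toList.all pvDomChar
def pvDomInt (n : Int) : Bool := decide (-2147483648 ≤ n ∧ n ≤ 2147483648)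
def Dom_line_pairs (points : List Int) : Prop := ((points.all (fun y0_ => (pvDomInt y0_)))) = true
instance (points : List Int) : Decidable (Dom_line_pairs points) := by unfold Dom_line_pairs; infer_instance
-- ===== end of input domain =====

-- B replaces A's shrinking-slice while-loop (with a deferred `first` sentinel) by building
-- the segment list once and pairing segs[i] with segs[(i+1) % n] via modular indexing.

-- ===== PORT A =====
-- the while-loop of A: state = (points, first); points shrinks by one each iteration
def line_pairs_go (points : List Int) (first : Option (List Int)) :
    List (List Int × Option (List Int)) :=
  if 3 ≤ points.length then
    let l0 := PySem.List.slice points none (some 2)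
    let l1 := PySem.List.slice points (some 1) (some 3)
    let points' := PySem.List.slice points (some 1) none
    let first' := if first = none then some l0 else first
    (l0, some l1) :: line_pairs_go points' first'
  else
    [(points, first)]
termination_by points.length
decreasing_by
  rw [PySem.List.slice_from points (by omega : (0:Int) ≤ 1)]
  simp only [List.length_drop]
  omega

def line_pairs (points : List Int) : List (List Int × Option (List Int)) :=
  line_pairs_go points none

-- ===== PORT B =====
def line_pairs_alt (points : List Int) : List (List Int × Option (List Int)) :=
  if (points.length : Int) < 3 then
    [(points, none)]
  else
    let segs := (PySem.List.pyRange 0 ((points.length : Int) - 1) 1).map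
      (fun i => PySem.List.slice points (some i) (some (i + 2)))
    let n : Int := segs.length
    (PySem.List.pyRange 0 n 1).map
      (fun i => (PySem.List.pyGetD segs i [], some (PySem.List.pyGetD segs (PySem.Int.mod (i + 1) n) [])))

-- ===== PRECONDITION & SPEC =====
def Spec_line_pairs (points : List Int) (out : List (List Int × Option (List Int))) : Prop := out = line_pairs_alt points
instance (points : List Int) (out : List (List Int × Option (List Int))) : Decidable (Spec_line_pairs points out) := by unfold Spec_line_pairs; infer_instance

-- ===== CLAIM (what is proved, stated in full; the proofs are below) =====
def Claim_equal_line_pairs : Prop := ∀ (points : List Int), Dom_line_pairs points → Spec_line_pairs points (line_pairs points)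

-- ===== LEMMAS AND PROOFS =====

-- the two-point segment starting at (nat) index i
def pvSeg (p : List Int) (i : Nat) : List Int := (p.drop i).take 2

lemma line_pairs_go_some (n : Nat) : ∀ (p : List Int) (f : List Int),
    p.length = n + 2 →
    line_pairs_go p (some f) =
      (List.range n).map (fun i => (pvSeg p i, some (pvSeg p (i + 1)))) ++ [(p.drop n, some f)] := by
  induction n with
  | zero =>
    intro p f h
    unfold line_pairs_go
    simp [h]
  | succ n ih =>
    intro p f h
    unfold line_pairs_go
    have h3 : 3 ≤ p.length := by omega
    simp only [if_pos h3]
    have hdrop : PySem.List.slice p (some 1) none = p.drop 1 := by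
      simpa using PySem.List.slice_from p (a := 1) (by omega)
    have hlen : (p.drop 1).length = n + 2 := by simp; omega
    rw [hdrop, if_neg (by simp : ¬ (some f = none)), ih (p.drop 1) f hlen]
    have hs0 : PySem.List.slice p none (some 2) = pvSeg p 0 := by
      simpa [pvSeg] using PySem.List.slice_to p (b := 2) (by omega)
    have hs1 : PySem.List.slice p (some 1) (some 3) = pvSeg p 1 := by
      simpa [pvSeg] using PySem.List.slice_toNat p (a := 1) (b := 3) (by omega) (by omega)
    rw [hs0, hs1]
    simp only [List.range_succ_eq_map, List.map_cons, List.map_map]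
    simp [pvSeg, Function.comp]

lemma line_pairs_char (p : List Int) (h : 3 ≤ p.length) :
    line_pairs p =
      (List.range (p.length - 2)).map (fun i => (pvSeg p i, some (pvSeg p (i + 1)))) ++
        [(p.drop (p.length - 2), some (pvSeg p 0))] := by
  unfold line_pairs
  unfold line_pairs_go
  simp only [if_pos h]
  have hdrop : PySem.List.slice p (some 1) none = p.drop 1 := by
    simpa using PySem.List.slice_from p (a := 1) (by omega)
  have hs0 : PySem.List.slice p none (some 2) = pvSeg p 0 := by
    simpa [pvSeg] using PySem.List.slice_to p (b := 2) (by omega)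
  have hs1 : PySem.List.slice p (some 1) (some 3) = pvSeg p 1 := by
    simpa [pvSeg] using PySem.List.slice_toNat p (a := 1) (b := 3) (by omega) (by omega)
  have hlen : (p.drop 1).length = (p.length - 3) + 2 := by simp; omega
  rw [hdrop, hs0, hs1]
  simp only [reduceIte]
  rw [line_pairs_go_some (p.length - 3) (p.drop 1) (pvSeg p 0) hlen]
  have hrange : p.length - 2 = (p.length - 3) + 1 := by omega
  rw [hrange]
  have hdd : ∀ k : Nat, (p.drop 1).drop k = p.drop (k + 1) := by
    intro k; rw [List.drop_drop]; ring_nf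
  simp only [List.range_succ_eq_map, List.map_cons, List.map_map, List.cons_append]
  congr 1
  congr 1
  · apply List.map_congr_left
    intro i _
    simp [pvSeg, Function.comp, Nat.succ_eq_add_one]
  · rw [hdd]

lemma pvSeg_mem_getD (p : List Int) (k : Nat) (hk : k < p.length - 1) :
    ((List.range (p.length - 1)).map (fun i => pvSeg p i)).getD k [] = pvSeg p k := by
  have : k < ((List.range (p.length - 1)).map (fun i => pvSeg p i)).length := by simpa using hk
  rw [List.getD_eq_getElem _ _ this]
  simp

lemma line_pairs_alt_char (p : List Int) (h : 3 ≤ p.length) :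
    line_pairs_alt p =
      (List.range (p.length - 1)).map
        (fun k => (pvSeg p k, some (pvSeg p ((k + 1) % (p.length - 1))))) := by
  unfold line_pairs_alt
  rw [if_neg (by omega)]
  have hcast : ((p.length : Int) - 1) = ((p.length - 1 : Nat) : Int) := by omega
  have hsegs : (PySem.List.pyRange 0 ((p.length : Int) - 1) 1).map
      (fun i => PySem.List.slice p (some i) (some (i + 2)))
      = (List.range (p.length - 1)).map (fun i => pvSeg p i) := by
    rw [hcast, PySem.List.pyRange_zero_nat, List.map_map]
    apply List.map_congr_left
    intro k hk
    simp only [Function.comp]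
    have h2 : ((k : Int) + 2) = ((k + 2 : Nat) : Int) := by push_cast; ring
    rw [h2, PySem.List.slice_toNat p (by exact_mod_cast Nat.zero_le k) (by exact_mod_cast Nat.zero_le (k+2))]
    simp [pvSeg]
    omega
  simp only [hsegs]
  have hlen : ((List.range (p.length - 1)).map (fun i => pvSeg p i)).length = p.length - 1 := by simp
  rw [hlen, PySem.List.pyRange_zero_nat, List.map_map]
  apply List.map_congr_left
  intro k hk
  simp only [List.mem_range] at hk
  simp only [Function.comp]
  have h1 : ((k : Int) + 1) = ((k + 1 : Nat) : Int) := by push_cast; ring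
  rw [h1, PySem.Int.mod_natCast, PySem.List.pyGetD_natCast, PySem.List.pyGetD_natCast,
      pvSeg_mem_getD p k hk, pvSeg_mem_getD p ((k + 1) % (p.length - 1)) (Nat.mod_lt _ (by omega))]

-- ===== VERDICT (by name: the statement is the Claim_ definition above) =====
theorem line_pairs_spec : Claim_equal_line_pairs := by
  intro p _
  unfold Spec_line_pairs
  by_cases h : 3 ≤ p.length
  · rw [line_pairs_char p h, line_pairs_alt_char p h]
    have hsplit : p.length - 1 = (p.length - 2) + 1 := by omega
    rw [hsplit, List.range_succ, List.map_append]
    congr 1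
    · apply List.map_congr_left
      intro k hk
      simp only [List.mem_range] at hk
      rw [Nat.mod_eq_of_lt (by omega)]
    · simp only [List.map_cons, List.map_nil]
      rw [Nat.mod_self]
      have : pvSeg p (p.length - 2) = p.drop (p.length - 2) := by
        unfold pvSeg
        rw [List.take_of_length_le (by simp; omega)]
      rw [this]
  · unfold line_pairs line_pairs_alt
    rw [line_pairs_go.eq_def, if_neg h, if_pos (by omega)]
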